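-- pv_equiv track=rewrite | github.com/jantuomi/ATK16 | src/ast_compiler.py | compact_spu_spo_pattern
-- ===== SOURCE A (Python) =====
-- def compact_spu_spo_pattern(asm: list[list[str]]) -> list[list[str]]:
--   i = 0
--   result: list[list[str]] = []
--   while i < len(asm):
--     current = asm[i]
--     next = asm[i + 1] if i + 1 < len(asm) else None
--     i += 1
--     if current[0].startswith("@") or next is None:
--       result.append(current)
--       continue
--
--     if current[0] == "spu" and next[0] == "spo":
--       arg_current = current[1]
--       arg_next = next[1]
--
--       if arg_current == arg_next:
--         pass # remove both spu and spo
--       else: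
--         mov = ["mov", arg_current, arg_next]
--         result.append(mov)
--
--       i += 1
--       continue
--
--     result.append(current)
--
--   return result
-- ===== SOURCE B (Python) =====
-- def compact_spu_spo_pattern(asm: list[list[str]]) -> list[list[str]]:
--   result: list[list[str]] = []
--   held = None  # a pending "spu" instruction waiting for a matching "spo"
--   for cur in asm:
--     if held is not None:
--       if cur[0] == "spo":
--         if held[1] != cur[1]:
--           result.append(["mov", held[1], cur[1]])
--         held = None
--         continue
--       result.append(held)
--       held = None
--     if cur[0] == "spu":
--       held = cur
--     else:
--       result.append(cur)
--   if held is not None: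
--     result.append(held)
--   return result
-- ===== Notes on version B (the rewrite author's own statement) =====
-- stated objective: alternative
-- what changed: Replaces A's index-based lookahead-and-skip loop with a single forward pass over the elements that keeps an optional pending 'spu' (look-behind buffer) and merges it when the next element is 'spo'.
import Mathlib
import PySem

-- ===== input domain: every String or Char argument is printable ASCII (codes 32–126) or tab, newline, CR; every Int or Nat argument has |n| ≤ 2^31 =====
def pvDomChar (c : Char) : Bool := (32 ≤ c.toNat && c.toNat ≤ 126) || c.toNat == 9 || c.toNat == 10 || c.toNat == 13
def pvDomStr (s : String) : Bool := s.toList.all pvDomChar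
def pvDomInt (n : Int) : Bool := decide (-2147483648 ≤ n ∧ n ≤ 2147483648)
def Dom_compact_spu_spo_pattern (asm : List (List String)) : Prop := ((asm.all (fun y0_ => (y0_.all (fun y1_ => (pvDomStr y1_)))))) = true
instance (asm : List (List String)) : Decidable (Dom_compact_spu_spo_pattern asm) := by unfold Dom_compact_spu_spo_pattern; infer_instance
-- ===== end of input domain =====

-- B replaces A's index-based lookahead-and-skip with a single pass keeping a pending `spu`
-- (look-behind buffer); same cost, different decomposition ("alternative").

-- ===== PORT A =====
-- A's while loop with index i and lookahead asm[i+1] becomes structural recursion on the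
-- suffix from i; `current[0]`/`current[1]` are headD/getD (in range on all Pre_ inputs,
-- where A does not raise).
def compact_spu_spo_pattern (asm : List (List String)) : List (List String) :=
  match asm with
  | [] => []
  | [current] => [current]  -- next is None: append current
  | current :: next :: rest =>
    if PySem.Str.startswith (current.headD "") "@" then
      current :: compact_spu_spo_pattern (next :: rest)
    else if current.headD "" = "spu" ∧ next.headD "" = "spo" then
      if current.getD 1 "" = next.getD 1 "" then
        compact_spu_spo_pattern rest  -- remove both spu and spo
      else
        ["mov", current.getD 1 "", next.getD 1 ""] :: compact_spu_spo_pattern rest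
    else
      current :: compact_spu_spo_pattern (next :: rest)

-- ===== PORT B =====
-- Source B's for-loop over cur with the optional `held` spu; the flush branch ("append held,
-- clear it, then handle cur fresh") is the recursive call with held = none on cur :: rest.
def altLoop (held : Option (List String)) (asm : List (List String)) : List (List String) :=
  match held, asm with
  | none, [] => []
  | some h, [] => [h]  -- final flush of a pending spu
  | some h, cur :: rest =>
    if cur.headD "" = "spo" then
      if h.getD 1 "" = cur.getD 1 "" then
        altLoop none rest
      else
        ["mov", h.getD 1 "", cur.getD 1 ""] :: altLoop none rest
    else
      h :: altLoop none (cur :: rest)  -- flush held, handle cur fresh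
  | none, cur :: rest =>
    if cur.headD "" = "spu" then
      altLoop (some cur) rest
    else
      cur :: altLoop none rest
  termination_by (asm.length, if held.isSome then 1 else 0)

def compact_spu_spo_pattern_alt (asm : List (List String)) : List (List String) :=
  altLoop none asm

-- ===== PRECONDITION & SPEC =====
-- Pre_ excludes exactly the inputs on which A raises IndexError: an empty instruction, or
-- an adjacent spu/spo pair one of whose members lacks its operand (length < 2).
def Pre_compact_spu_spo_pattern (asm : List (List String)) : Prop :=
  (∀ x ∈ asm, x ≠ []) ∧
  (∀ p ∈ asm.zip asm.tail,
    (p.1.headD "" = "spu" ∧ p.2.headD "" = "spo") → 2 ≤ p.1.length ∧ 2 ≤ p.2.length)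
instance (asm : List (List String)) : Decidable (Pre_compact_spu_spo_pattern asm) := by
  unfold Pre_compact_spu_spo_pattern; infer_instance

def pvWitness_compact_spu_spo_pattern : List (List String) :=
  [["spu", "ra"], ["spo", "rb"], ["add", "ra"], ["@label"], ["spu", "rc"]]

def Spec_compact_spu_spo_pattern (asm : List (List String)) (out : List (List String)) : Prop := out = compact_spu_spo_pattern_alt asm
instance (asm : List (List String)) (out : List (List String)) : Decidable (Spec_compact_spu_spo_pattern asm out) := by unfold Spec_compact_spu_spo_pattern; infer_instance

-- ===== CLAIM (what is proved, stated in full; the proofs are below) =====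
def Claim_equal_compact_spu_spo_pattern : Prop := ∀ (asm : List (List String)), Dom_compact_spu_spo_pattern asm → Pre_compact_spu_spo_pattern asm → Spec_compact_spu_spo_pattern asm (compact_spu_spo_pattern asm)

-- ===== LEMMAS AND PROOFS =====

-- The two ports agree on every input (the proof does not even need Pre_; Pre_ marks where
-- the Pythons themselves return).
theorem compA_eq_altLoop :
    ∀ (n : Nat) (asm : List (List String)), asm.length ≤ n →
      compact_spu_spo_pattern asm = altLoop none asm := by
  intro n
  induction n with
  | zero =>
    intro asm hlen
    have : asm = [] := List.eq_nil_of_length_eq_zero (Nat.le_zero.mp hlen)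
    subst this
    simp [compact_spu_spo_pattern, altLoop]
  | succ m ih =>
    intro asm hlen
    match asm with
    | [] => simp [compact_spu_spo_pattern, altLoop]
    | [c] =>
      rw [compact_spu_spo_pattern, altLoop]
      by_cases hc : c.headD "" = "spu"
      · rw [if_pos hc, altLoop]
      · rw [if_neg hc, altLoop]
    | c :: d :: rest =>
      have hlen1 : (d :: rest).length ≤ m := by
        simpa using Nat.le_of_succ_le_succ hlen
      have hlen2 : rest.length ≤ m := Nat.le_of_succ_le (by simpa using hlen1)
      by_cases hat : PySem.Str.startswith (c.headD "") "@" = true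
      · have hsu : ¬ c.headD "" = "spu" := by
          intro h; rw [h] at hat; exact absurd hat (by decide)
        rw [compact_spu_spo_pattern, altLoop, if_pos hat, if_neg hsu, ih _ hlen1]
      · by_cases hsu : c.headD "" = "spu"
        · by_cases hso : d.headD "" = "spo"
          · rw [compact_spu_spo_pattern, altLoop, if_neg hat, if_pos (And.intro hsu hso),
              if_pos hsu, altLoop, if_pos hso]
            by_cases harg : c.getD 1 "" = d.getD 1 ""
            · rw [if_pos harg, if_pos harg, ih _ hlen2]
            · rw [if_neg harg, if_neg harg, ih _ hlen2]
          · have hns : ¬ (c.headD "" = "spu" ∧ d.headD "" = "spo") := fun h => hso h.2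
            rw [compact_spu_spo_pattern, altLoop, if_neg hat, if_neg hns, if_pos hsu,
              altLoop, if_neg hso, ih _ hlen1]
        · have hns : ¬ (c.headD "" = "spu" ∧ d.headD "" = "spo") := fun h => hsu h.1
          rw [compact_spu_spo_pattern, altLoop, if_neg hat, if_neg hns, if_neg hsu,
            ih _ hlen1]

-- ===== VERDICT (by name: the statement is the Claim_ definition above) =====
theorem compact_spu_spo_pattern_spec : Claim_equal_compact_spu_spo_pattern := by
  intro asm _ _
  unfold Spec_compact_spu_spo_pattern compact_spu_spo_pattern_alt
  exact compA_eq_altLoop asm.length asm (Nat.le_refl _)
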